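-- pv_equiv track=rewrite | github.com/narasingapranav/healthcare-ai-agent | src/medication_interactions.py | check_interactions
-- ===== SOURCE A (Python) =====
-- from itertools import combinations
--
-- KNOWN_INTERACTIONS: dict[frozenset[str], str] = {
--     frozenset({"ibuprofen", "warfarin"}): "Higher bleeding risk when used together. Consult a doctor.",
--     frozenset({"aspirin", "warfarin"}): "Higher bleeding risk when used together. Consult a doctor.",
--     frozenset({"metformin", "alcohol"}): "May raise risk of lactic acidosis. Avoid heavy alcohol use.",
--     frozenset({"lisinopril", "potassium"}): "May increase potassium levels. Monitor with clinician guidance.",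
-- }
--
-- def check_interactions(medication_names: list[str]) -> list[str]:
--     normalized = [name.strip().lower() for name in medication_names if name and name.strip()]
--     findings: list[str] = []
--
--     for a, b in combinations(sorted(set(normalized)), 2):
--         key = frozenset({a, b})
--         warning = KNOWN_INTERACTIONS.get(key)
--         if warning:
--             findings.append(f"{a.title()} + {b.title()}: {warning}")
--
--     return findings
-- ===== SOURCE B (Python) =====
-- # B: iterate the constant known-interaction table (pre-sorted by pair) and test
-- # set membership, instead of scanning all O(k^2) pairs of distinct medications.
-- _KNOWN_SORTED = [
--     (("alcohol", "metformin"), "May raise risk of lactic acidosis. Avoid heavy alcohol use."),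
--     (("aspirin", "warfarin"), "Higher bleeding risk when used together. Consult a doctor."),
--     (("ibuprofen", "warfarin"), "Higher bleeding risk when used together. Consult a doctor."),
--     (("lisinopril", "potassium"), "May increase potassium levels. Monitor with clinician guidance."),
-- ]
--
-- def check_interactions(medication_names: list[str]) -> list[str]:
--     meds = {name.strip().lower() for name in medication_names if name and name.strip()}
--     return [
--         f"{a.title()} + {b.title()}: {warning}"
--         for (a, b), warning in _KNOWN_SORTED
--         if a in meds and b in meds
--     ]
-- ===== Notes on version B (the rewrite author's own statement) =====
-- stated objective: faster
-- what changed: Instead of enumerating all pairs of the sorted distinct medications and looking each pair up in the interaction dict, B builds the medication set once and iterates the constant 4-entry interaction table (pre-sorted by pair) testing set membership.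
import Mathlib
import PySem

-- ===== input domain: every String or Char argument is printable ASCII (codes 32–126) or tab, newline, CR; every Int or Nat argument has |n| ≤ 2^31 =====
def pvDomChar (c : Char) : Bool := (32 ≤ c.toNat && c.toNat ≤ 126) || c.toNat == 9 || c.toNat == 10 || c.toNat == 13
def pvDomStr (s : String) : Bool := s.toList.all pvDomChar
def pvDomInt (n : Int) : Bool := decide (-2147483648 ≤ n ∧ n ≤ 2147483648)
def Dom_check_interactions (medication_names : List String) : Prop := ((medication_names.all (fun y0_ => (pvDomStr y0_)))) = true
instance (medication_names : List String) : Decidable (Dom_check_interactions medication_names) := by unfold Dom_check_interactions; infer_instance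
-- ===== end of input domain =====

-- B iterates the constant known-interaction table (pre-sorted by pair) testing set
-- membership, instead of scanning all pairs of the sorted distinct medications (faster).


-- ===== PORT A =====
-- str.title(), exact on ASCII: a letter is uppercased after a non-letter, lowercased otherwise
def pvTitleChars : Bool → List Char → List Char
  | _, [] => []
  | prev, c :: cs =>
      (if PySem.Chars.isalpha c then (if prev then PySem.Chars.lowerChar c else PySem.Chars.upperChar c) else c)
        :: pvTitleChars (PySem.Chars.isalpha c) cs

def pvTitle (s : String) : String := String.ofList (pvTitleChars false s.toList)

-- f"{a.title()} + {b.title()}: {w}"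
def pvFmt (a b w : String) : String := pvTitle a ++ " + " ++ pvTitle b ++ ": " ++ w

-- KNOWN_INTERACTIONS: frozenset keys modelled as PySem.Set String
def pvKnownInteractions : List (PySem.Set String × String) :=
  [ (PySem.Set.ofList ["ibuprofen", "warfarin"], "Higher bleeding risk when used together. Consult a doctor."),
    (PySem.Set.ofList ["aspirin", "warfarin"], "Higher bleeding risk when used together. Consult a doctor."),
    (PySem.Set.ofList ["metformin", "alcohol"], "May raise risk of lactic acidosis. Avoid heavy alcohol use."),
    (PySem.Set.ofList ["lisinopril", "potassium"], "May increase potassium levels. Monitor with clinician guidance.") ]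

-- dict.get with frozenset keys: scan entries, compare keys by set equality (exact for frozenset)
def pvGetFS (d : List (PySem.Set String × String)) (k : PySem.Set String) : Option String :=
  match d with
  | [] => none
  | (k', v) :: t => if PySem.Set.equal k' k then some v else pvGetFS t k

def check_interactions (medication_names : List String) : List String :=
  let normalized := (medication_names.filter
      (fun name => decide (name ≠ "") && decide (PySem.Str.strip name ≠ ""))).map
      (fun name => PySem.Str.lower (PySem.Str.strip name))
  (PySem.List.combinations (PySem.List.sorted (PySem.Set.ofList normalized) (fun x => x) false) 2).foldl
    (fun findings c =>
      match c with
      | [a, b] =>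
          match pvGetFS pvKnownInteractions (PySem.Set.add (PySem.Set.add PySem.Set.empty a) b) with
          | some warning => if warning ≠ "" then findings ++ [pvFmt a b warning] else findings
          | none => findings
      | _ => findings) []

-- ===== PORT B =====
-- the constant interaction table, each pair sorted, entries sorted by pair
def pvKnownSorted : List ((String × String) × String) :=
  [ (("alcohol", "metformin"), "May raise risk of lactic acidosis. Avoid heavy alcohol use."),
    (("aspirin", "warfarin"), "Higher bleeding risk when used together. Consult a doctor."),
    (("ibuprofen", "warfarin"), "Higher bleeding risk when used together. Consult a doctor."),
    (("lisinopril", "potassium"), "May increase potassium levels. Monitor with clinician guidance.") ]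

def check_interactions_alt (medication_names : List String) : List String :=
  let meds : PySem.Set String := PySem.Set.ofList
    ((medication_names.filter
        (fun name => decide (name ≠ "") && decide (PySem.Str.strip name ≠ ""))).map
        (fun name => PySem.Str.lower (PySem.Str.strip name)))
  (pvKnownSorted.filter
      (fun p => PySem.Set.contains meds p.1.1 && PySem.Set.contains meds p.1.2)).map
    (fun p => pvFmt p.1.1 p.1.2 p.2)

-- ===== PRECONDITION & SPEC =====
def Spec_check_interactions (medication_names : List String) (out : List String) : Prop := out = check_interactions_alt medication_names
instance (medication_names : List String) (out : List String) : Decidable (Spec_check_interactions medication_names out) := by unfold Spec_check_interactions; infer_instance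

-- ===== CLAIM (what is proved, stated in full; the proofs are below) =====
def Claim_equal_check_interactions : Prop := ∀ (medication_names : List String), Dom_check_interactions medication_names → Spec_check_interactions medication_names (check_interactions medication_names)

-- ===== LEMMAS AND PROOFS =====

-- the per-pair result of A's inner loop body
def pvGA (c : List String) : Option String :=
  match c with
  | [a, b] =>
      match pvGetFS pvKnownInteractions (PySem.Set.add (PySem.Set.add PySem.Set.empty a) b) with
      | some warning => if warning ≠ "" then some (pvFmt a b warning) else none
      | none => none
  | _ => none

theorem pv_foldl_eq_filterMap (L : List (List String)) (acc : List String) :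
    L.foldl (fun findings c =>
      match c with
      | [a, b] =>
          match pvGetFS pvKnownInteractions (PySem.Set.add (PySem.Set.add PySem.Set.empty a) b) with
          | some warning => if warning ≠ "" then findings ++ [pvFmt a b warning] else findings
          | none => findings
      | _ => findings) acc = acc ++ L.filterMap pvGA := by
  induction L generalizing acc with
  | nil => simp
  | cons c t ih =>
    rw [List.foldl_cons]
    have hstep : (match c with
      | [a, b] =>
          match pvGetFS pvKnownInteractions (PySem.Set.add (PySem.Set.add PySem.Set.empty a) b) with
          | some warning => if warning ≠ "" then acc ++ [pvFmt a b warning] else acc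
          | none => acc
      | _ => acc) = acc ++ (pvGA c).toList := by
      match c with
      | [] => simp [pvGA]
      | [a] => simp [pvGA]
      | [a, b] =>
        simp only [pvGA]
        cases h : pvGetFS pvKnownInteractions (PySem.Set.add (PySem.Set.add PySem.Set.empty a) b) with
        | none => simp
        | some w => by_cases hw : w = "" <;> simp [hw]
      | a :: b :: c' :: t' => simp [pvGA]
    rw [hstep, ih, List.filterMap_cons]
    cases pvGA c <;> simp

theorem pv_equal_pair (k1 k2 a b : String) (hk : k1 ≠ k2) (_hab : a ≠ b) :
    (PySem.Set.equal (PySem.Set.ofList [k1, k2]) (PySem.Set.add (PySem.Set.add PySem.Set.empty a) b) = true)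
      ↔ ((a = k1 ∧ b = k2) ∨ (a = k2 ∧ b = k1)) := by
  rw [PySem.Set.equal_iff]
  constructor
  · intro h
    have h1 : k1 = a ∨ k1 = b := by
      have hh := (h k1).mp (by simp [PySem.Set.mem_ofList])
      simpa [PySem.Set.mem_add, PySem.Set.empty] using hh
    have h2 : k2 = a ∨ k2 = b := by
      have hh := (h k2).mp (by simp [PySem.Set.mem_ofList])
      simpa [PySem.Set.mem_add, PySem.Set.empty] using hh
    rcases h1 with h1 | h1 <;> rcases h2 with h2 | h2
    · exact absurd (h1.trans h2.symm) hk
    · exact Or.inl ⟨h1.symm, h2.symm⟩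
    · exact Or.inr ⟨h2.symm, h1.symm⟩
    · exact absurd (h1.trans h2.symm) hk
  · rintro (⟨rfl, rfl⟩ | ⟨rfl, rfl⟩) <;> intro x <;>
      · simp [PySem.Set.mem_ofList, PySem.Set.mem_add, PySem.Set.empty]
        try tauto

theorem pvGA_eq (a b : String) (hab : a < b) :
    pvGA [a, b] =
      if a = "alcohol" ∧ b = "metformin" then some (pvFmt "alcohol" "metformin" "May raise risk of lactic acidosis. Avoid heavy alcohol use.")
      else if a = "aspirin" ∧ b = "warfarin" then some (pvFmt "aspirin" "warfarin" "Higher bleeding risk when used together. Consult a doctor.")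
      else if a = "ibuprofen" ∧ b = "warfarin" then some (pvFmt "ibuprofen" "warfarin" "Higher bleeding risk when used together. Consult a doctor.")
      else if a = "lisinopril" ∧ b = "potassium" then some (pvFmt "lisinopril" "potassium" "May increase potassium levels. Monitor with clinician guidance.")
      else none := by
  have hab' : a ≠ b := ne_of_lt hab
  have horder : ∀ (k1 k2 : String), k1 < k2 → ¬ (a = k2 ∧ b = k1) := by
    rintro k1 k2 hlt ⟨ha, hb⟩
    rw [ha, hb] at hab
    exact lt_irrefl _ (hlt.trans hab)
  simp only [pvGA, pvKnownInteractions, pvGetFS]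
  by_cases h1 : (PySem.Set.ofList ["ibuprofen", "warfarin"]).equal ((PySem.Set.empty.add a).add b) = true
  · rw [if_pos h1]
    rcases (pv_equal_pair _ _ _ _ (by simp) hab').mp h1 with ⟨rfl, rfl⟩ | hrev
    · simp
    · exact absurd hrev (horder _ _ (by simp; decide))
  · rw [if_neg h1]
    by_cases h2 : (PySem.Set.ofList ["aspirin", "warfarin"]).equal ((PySem.Set.empty.add a).add b) = true
    · rw [if_pos h2]
      rcases (pv_equal_pair _ _ _ _ (by simp) hab').mp h2 with ⟨rfl, rfl⟩ | hrev
      · simp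
      · exact absurd hrev (horder _ _ (by simp; decide))
    · rw [if_neg h2]
      by_cases h3 : (PySem.Set.ofList ["metformin", "alcohol"]).equal ((PySem.Set.empty.add a).add b) = true
      · rw [if_pos h3]
        rcases (pv_equal_pair _ _ _ _ (by simp) hab').mp h3 with hrev | ⟨rfl, rfl⟩
        · exact absurd hrev (horder _ _ (by simp; decide))
        · simp
      · rw [if_neg h3]
        by_cases h4 : (PySem.Set.ofList ["lisinopril", "potassium"]).equal ((PySem.Set.empty.add a).add b) = true
        · rw [if_pos h4]
          rcases (pv_equal_pair _ _ _ _ (by simp) hab').mp h4 with ⟨rfl, rfl⟩ | hrev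
          · simp
          · exact absurd hrev (horder _ _ (by simp; decide))
        · rw [if_neg h4]
          split_ifs with g1 g2 g3 g4
          · exact absurd ((pv_equal_pair _ _ _ _ (by simp) hab').mpr (Or.inr ⟨g1.1, g1.2⟩)) h3
          · exact absurd ((pv_equal_pair _ _ _ _ (by simp) hab').mpr (Or.inl ⟨g2.1, g2.2⟩)) h2
          · exact absurd ((pv_equal_pair _ _ _ _ (by simp) hab').mpr (Or.inl ⟨g3.1, g3.2⟩)) h1
          · exact absurd ((pv_equal_pair _ _ _ _ (by simp) hab').mpr (Or.inl ⟨g4.1, g4.2⟩)) h4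
          · rfl

theorem pv_filterMap_single (S : List String) (hnd : S.Nodup) (m : String) (v : String) :
    (S.filterMap fun y => if y = m then some v else none) = if m ∈ S then [v] else [] := by
  induction S with
  | nil => simp
  | cons y t ih =>
    rcases List.nodup_cons.mp hnd with ⟨hy, hnd'⟩
    by_cases h : y = m
    · subst h
      simp [hy, List.filterMap_eq_nil_iff]
      intro z hz hzy
      exact hy (hzy ▸ hz)
    · simp [h, ih hnd', List.mem_cons, Ne.symm h]

theorem pv_cons_pair_iff (x k1 k2 : String) (S : List String) (hk : k1 < k2) (hx : ∀ y ∈ S, x < y) :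
    ((k1 = x ∨ k1 ∈ S) ∧ (k2 = x ∨ k2 ∈ S)) ↔ ((k1 = x ∧ k2 ∈ S) ∨ (k1 ∈ S ∧ k2 ∈ S)) := by
  constructor
  · rintro ⟨h1 | h1, h2 | h2⟩
    · exact absurd (h1.trans h2.symm) (ne_of_lt hk)
    · exact Or.inl ⟨h1, h2⟩
    · exact absurd (lt_trans (hx k1 h1) (h2 ▸ hk)) (lt_irrefl x)
    · exact Or.inr ⟨h1, h2⟩
  · rintro (⟨h1, h2⟩ | ⟨h1, h2⟩)
    · exact ⟨Or.inl h1, Or.inr h2⟩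
    · exact ⟨Or.inr h1, Or.inr h2⟩

theorem pv_filter_or_append {α : Type} (P : List α) (c1 c2 : α → Prop) [DecidablePred c1] [DecidablePred c2]
    (hdisj : ∀ p ∈ P, ¬ (c1 p ∧ c2 p))
    (horder : P.Pairwise (fun p q => ¬ (c2 p ∧ c1 q))) :
    P.filter (fun p => decide (c1 p) || decide (c2 p)) = P.filter (fun p => decide (c1 p)) ++ P.filter (fun p => decide (c2 p)) := by
  induction P with
  | nil => simp
  | cons p t ih =>
    rcases List.pairwise_cons.mp horder with ⟨hp, horder'⟩
    have hd := hdisj p (List.mem_cons_self)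
    have hdisj' : ∀ q ∈ t, ¬ (c1 q ∧ c2 q) := fun q hq => hdisj q (List.mem_cons_of_mem _ hq)
    by_cases h1 : c1 p
    · have h2 : ¬ c2 p := fun h => hd ⟨h1, h⟩
      simp [h1, h2, ih hdisj' horder']
    · by_cases h2 : c2 p
      · have hnone : t.filter (fun q => decide (c1 q)) = [] := by
          rw [List.filter_eq_nil_iff]
          intro q hq
          simp only [decide_eq_true_eq]
          exact fun hc1 => hp q hq ⟨h2, hc1⟩
        simp [h1, h2, ih hdisj' horder', hnone]
      · simp [h1, h2, ih hdisj' horder']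

theorem pv_head_part (x : String) (S : List String) (hx : ∀ y ∈ S, x < y) (hnd : S.Nodup) :
    S.filterMap (fun y => pvGA [x, y]) =
      (pvKnownSorted.filter (fun p => decide (p.1.1 = x ∧ p.1.2 ∈ S))).map (fun p => pvFmt p.1.1 p.1.2 p.2) := by
  rw [List.filterMap_congr (fun y hy => pvGA_eq x y (hx y hy))]
  by_cases h1 : x = "alcohol"
  · subst h1
    rw [show (fun y => if ("alcohol" : String) = "alcohol" ∧ y = "metformin" then some (pvFmt "alcohol" "metformin" "May raise risk of lactic acidosis. Avoid heavy alcohol use.")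
      else if ("alcohol" : String) = "aspirin" ∧ y = "warfarin" then some (pvFmt "aspirin" "warfarin" "Higher bleeding risk when used together. Consult a doctor.")
      else if ("alcohol" : String) = "ibuprofen" ∧ y = "warfarin" then some (pvFmt "ibuprofen" "warfarin" "Higher bleeding risk when used together. Consult a doctor.")
      else if ("alcohol" : String) = "lisinopril" ∧ y = "potassium" then some (pvFmt "lisinopril" "potassium" "May increase potassium levels. Monitor with clinician guidance.")
      else none) = (fun y => if y = "metformin" then some (pvFmt "alcohol" "metformin" "May raise risk of lactic acidosis. Avoid heavy alcohol use.") else none) from funext fun y => by simp]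
    rw [pv_filterMap_single S hnd]
    by_cases hm : ("metformin" : String) ∈ S <;> simp [pvKnownSorted, List.filter, hm]
  · by_cases h2 : x = "aspirin"
    · subst h2
      rw [show (fun y => if ("aspirin" : String) = "alcohol" ∧ y = "metformin" then some (pvFmt "alcohol" "metformin" "May raise risk of lactic acidosis. Avoid heavy alcohol use.")
        else if ("aspirin" : String) = "aspirin" ∧ y = "warfarin" then some (pvFmt "aspirin" "warfarin" "Higher bleeding risk when used together. Consult a doctor.")
        else if ("aspirin" : String) = "ibuprofen" ∧ y = "warfarin" then some (pvFmt "ibuprofen" "warfarin" "Higher bleeding risk when used together. Consult a doctor.")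
        else if ("aspirin" : String) = "lisinopril" ∧ y = "potassium" then some (pvFmt "lisinopril" "potassium" "May increase potassium levels. Monitor with clinician guidance.")
        else none) = (fun y => if y = "warfarin" then some (pvFmt "aspirin" "warfarin" "Higher bleeding risk when used together. Consult a doctor.") else none) from funext fun y => by simp]
      rw [pv_filterMap_single S hnd]
      by_cases hm : ("warfarin" : String) ∈ S <;> simp [pvKnownSorted, List.filter, hm]
    · by_cases h3 : x = "ibuprofen"
      · subst h3
        rw [show (fun y => if ("ibuprofen" : String) = "alcohol" ∧ y = "metformin" then some (pvFmt "alcohol" "metformin" "May raise risk of lactic acidosis. Avoid heavy alcohol use.")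
          else if ("ibuprofen" : String) = "aspirin" ∧ y = "warfarin" then some (pvFmt "aspirin" "warfarin" "Higher bleeding risk when used together. Consult a doctor.")
          else if ("ibuprofen" : String) = "ibuprofen" ∧ y = "warfarin" then some (pvFmt "ibuprofen" "warfarin" "Higher bleeding risk when used together. Consult a doctor.")
          else if ("ibuprofen" : String) = "lisinopril" ∧ y = "potassium" then some (pvFmt "lisinopril" "potassium" "May increase potassium levels. Monitor with clinician guidance.")
          else none) = (fun y => if y = "warfarin" then some (pvFmt "ibuprofen" "warfarin" "Higher bleeding risk when used together. Consult a doctor.") else none) from funext fun y => by simp]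
        rw [pv_filterMap_single S hnd]
        by_cases hm : ("warfarin" : String) ∈ S <;> simp [pvKnownSorted, List.filter, hm]
      · by_cases h4 : x = "lisinopril"
        · subst h4
          rw [show (fun y => if ("lisinopril" : String) = "alcohol" ∧ y = "metformin" then some (pvFmt "alcohol" "metformin" "May raise risk of lactic acidosis. Avoid heavy alcohol use.")
            else if ("lisinopril" : String) = "aspirin" ∧ y = "warfarin" then some (pvFmt "aspirin" "warfarin" "Higher bleeding risk when used together. Consult a doctor.")
            else if ("lisinopril" : String) = "ibuprofen" ∧ y = "warfarin" then some (pvFmt "ibuprofen" "warfarin" "Higher bleeding risk when used together. Consult a doctor.")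
            else if ("lisinopril" : String) = "lisinopril" ∧ y = "potassium" then some (pvFmt "lisinopril" "potassium" "May increase potassium levels. Monitor with clinician guidance.")
            else none) = (fun y => if y = "potassium" then some (pvFmt "lisinopril" "potassium" "May increase potassium levels. Monitor with clinician guidance.") else none) from funext fun y => by simp]
          rw [pv_filterMap_single S hnd]
          by_cases hm : ("potassium" : String) ∈ S <;> simp [pvKnownSorted, List.filter, hm]
        · rw [show (fun y => if x = "alcohol" ∧ y = "metformin" then some (pvFmt "alcohol" "metformin" "May raise risk of lactic acidosis. Avoid heavy alcohol use.")
            else if x = "aspirin" ∧ y = "warfarin" then some (pvFmt "aspirin" "warfarin" "Higher bleeding risk when used together. Consult a doctor.")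
            else if x = "ibuprofen" ∧ y = "warfarin" then some (pvFmt "ibuprofen" "warfarin" "Higher bleeding risk when used together. Consult a doctor.")
            else if x = "lisinopril" ∧ y = "potassium" then some (pvFmt "lisinopril" "potassium" "May increase potassium levels. Monitor with clinician guidance.")
            else none) = (fun _ => (none : Option String)) from funext fun y => by simp [h1, h2, h3, h4]]
          simp [pvKnownSorted, List.filter, Ne.symm h1, Ne.symm h2, Ne.symm h3, Ne.symm h4]

theorem pv_contains_and (M : PySem.Set String) (a b : String) :
    (M.contains a && M.contains b) = decide (a ∈ M ∧ b ∈ M) := by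
  simp [PySem.Set.contains]

theorem pv_mainA (S : List String) (hS : S.Pairwise (· < ·)) :
    (PySem.List.combinations S 2).filterMap pvGA =
      (pvKnownSorted.filter (fun p => decide (p.1.1 ∈ S ∧ p.1.2 ∈ S))).map (fun p => pvFmt p.1.1 p.1.2 p.2) := by
  induction S with
  | nil =>
    rw [PySem.List.combinations_nil_succ]
    simp
  | cons x S ih =>
    rcases List.pairwise_cons.mp hS with ⟨hx, hS'⟩
    have hnd : S.Nodup := hS'.imp ne_of_lt
    rw [PySem.List.combinations_cons_succ, PySem.List.combinations_one, List.filterMap_append]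
    simp only [List.filterMap_map, Function.comp_def]
    have hPfst : pvKnownSorted.Pairwise (fun p q => p.1.1 < q.1.1) := by
      simp [pvKnownSorted, List.pairwise_cons]
      decide
    rw [ih hS', pv_head_part x S hx hnd, ← List.map_append,
      ← pv_filter_or_append pvKnownSorted (fun p => p.1.1 = x ∧ p.1.2 ∈ S) (fun p => p.1.1 ∈ S ∧ p.1.2 ∈ S)
        (by intro p _ h; exact lt_irrefl x (hx x (h.1.1 ▸ h.2.1)))
        (hPfst.imp (by intro p q hlt h; exact lt_irrefl x (lt_trans (hx _ h.1.1) (h.2.1 ▸ hlt))))]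
    refine congrArg _ (List.filter_congr fun p hp => ?_).symm
    have hk : p.1.1 < p.1.2 := by
      have : ∀ q ∈ pvKnownSorted, q.1.1 < q.1.2 := by
        intro q hq
        fin_cases hq <;> (simp; decide)
      exact this p hp
    rw [← Bool.decide_or, decide_eq_decide]
    simp only [List.mem_cons]
    exact pv_cons_pair_iff x p.1.1 p.1.2 S hk hx

-- ===== VERDICT (by name: the statement is the Claim_ definition above) =====
theorem check_interactions_spec : Claim_equal_check_interactions := by
  intro medication_names _
  unfold Spec_check_interactions check_interactions check_interactions_alt
  rw [pv_foldl_eq_filterMap, List.nil_append,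
    pv_mainA _ (PySem.List.sorted_ofList_pairwise_lt _)]
  refine congrArg _ (List.filter_congr fun p _ => ?_)
  simp only [PySem.List.mem_sorted]
  exact (pv_contains_and _ _ _).symm
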